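-- pv_equiv track=rewrite | github.com/calebthecm/MindVault | src/category_discovery.py | make_category_name
-- ===== SOURCE A (Python) =====
-- def make_category_name(keywords: list[str]) -> str:
--     """Turn a list of keywords into a readable category name."""
--     # Prefer multi-word keywords (bigrams) as they're more descriptive
--     bigrams = [kw for kw in keywords if "-" in kw]
--     singles = [kw for kw in keywords if "-" not in kw]
--
--     if bigrams:
--         name = bigrams[0].replace("-", " ").title()
--     elif singles:
--         # Use the top 2 most-meaningful single words
--         name = " & ".join(w.title() for w in singles[:2])
--     else:
--         name = "General"
--
--     return name
-- ===== SOURCE B (Python) =====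
-- def make_category_name(keywords: list[str]) -> str:
--     """Turn a list of keywords into a readable category name."""
--     # one pass: stop at the first bigram; otherwise keep at most two singles
--     first_bigram = None
--     singles = []
--     for kw in keywords:
--         if "-" in kw:
--             first_bigram = kw
--             break
--         if len(singles) < 2:
--             singles.append(kw)
--     if first_bigram is not None:
--         return first_bigram.replace("-", " ").title()
--     if singles:
--         return " & ".join(w.title() for w in singles)
--     return "General"
-- ===== Notes on version B (the rewrite author's own statement) =====
-- stated objective: alternative
-- what changed: Replaces A's two full filtering passes (bigrams and singles lists) with a single early-exiting loop that keeps only the first '-'-keyword and at most two singles.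
import Mathlib
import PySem

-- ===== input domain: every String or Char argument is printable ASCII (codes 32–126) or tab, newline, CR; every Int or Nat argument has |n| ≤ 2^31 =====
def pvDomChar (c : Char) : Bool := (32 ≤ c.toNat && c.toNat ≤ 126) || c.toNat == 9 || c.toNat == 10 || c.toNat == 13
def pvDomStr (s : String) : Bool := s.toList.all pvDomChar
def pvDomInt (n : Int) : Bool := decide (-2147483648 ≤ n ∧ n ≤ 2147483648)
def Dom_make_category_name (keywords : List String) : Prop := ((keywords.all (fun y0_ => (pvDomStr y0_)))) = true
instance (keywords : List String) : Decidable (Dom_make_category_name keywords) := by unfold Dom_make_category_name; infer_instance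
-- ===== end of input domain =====

-- B replaces A's two filtering passes by one early-exiting traversal keeping first bigram / first two singles (alternative decomposition, same cost).

-- str.title(): hand port, exact on ASCII (Python's word boundary is a cased char;
-- in ASCII the cased characters are exactly the alphabetic ones).
def pyTitleChars : Bool → List Char → List Char
  | _, [] => []
  | prevAlpha, c :: cs =>
    if PySem.Chars.isalpha c then
      (if prevAlpha then PySem.Chars.lowerChar c else PySem.Chars.upperChar c) :: pyTitleChars true cs
    else
      c :: pyTitleChars false cs

def pyTitle (s : String) : String := String.ofList (pyTitleChars false s.toList)

-- ===== PORT A =====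
def make_category_name (keywords : List String) : String :=
  let bigrams := keywords.filter (fun kw => PySem.Str.isIn "-" kw)
  let singles := keywords.filter (fun kw => !PySem.Str.isIn "-" kw)
  match bigrams with
  | b :: _ => pyTitle (PySem.Str.replace b "-" " ")
  | [] =>
    match singles with
    | [] => "General"
    | _ :: _ => PySem.Str.join " & " ((PySem.List.slice singles none (some 2)).map pyTitle)

-- ===== PORT B =====
-- the loop of Source B: first component = first_bigram, second = singles (≤ 2)
def altScan : List String → List String → Option String × List String
  | [], singles => (none, singles)
  | kw :: rest, singles =>
    if PySem.Str.isIn "-" kw then (some kw, singles)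
    else altScan rest (if singles.length < 2 then singles ++ [kw] else singles)

def make_category_name_alt (keywords : List String) : String :=
  match altScan keywords [] with
  | (some b, _) => pyTitle (PySem.Str.replace b "-" " ")
  | (none, []) => "General"
  | (none, singles) => PySem.Str.join " & " (singles.map pyTitle)

-- ===== PRECONDITION & SPEC =====
def Spec_make_category_name (keywords : List String) (out : String) : Prop := out = make_category_name_alt keywords
instance (keywords : List String) (out : String) : Decidable (Spec_make_category_name keywords out) := by unfold Spec_make_category_name; infer_instance

-- ===== CLAIM (what is proved, stated in full; the proofs are below) =====
def Claim_equal_make_category_name : Prop := ∀ (keywords : List String), Dom_make_category_name keywords → Spec_make_category_name keywords (make_category_name keywords)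

-- ===== LEMMAS AND PROOFS =====

-- the first component of the scan is the head of A's bigram filter
theorem altScan_fst (ks acc : List String) :
    (altScan ks acc).1 = (ks.filter (fun kw => PySem.Str.isIn "-" kw)).head? := by
  induction ks generalizing acc with
  | nil => simp [altScan]
  | cons kw rest ih =>
    simp only [altScan, List.filter_cons]
    by_cases h : PySem.Str.isIn "-" kw = true
    · rw [if_pos h, if_pos h]; rfl
    · rw [if_neg h, if_neg h, ih]

-- with no bigram present the scan collects the first (2 - |acc|) keywords
theorem altScan_snd (ks : List String) (acc : List String)
    (hnd : ∀ kw ∈ ks, ¬ PySem.Str.isIn "-" kw = true) (hlen : acc.length ≤ 2) :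
    (altScan ks acc).2 = acc ++ ks.take (2 - acc.length) := by
  induction ks generalizing acc with
  | nil => simp [altScan]
  | cons kw rest ih =>
    have hkw : ¬ PySem.Str.isIn "-" kw = true := hnd kw (by simp)
    have hrest : ∀ k ∈ rest, ¬ PySem.Str.isIn "-" k = true := fun k hk => hnd k (by simp [hk])
    simp only [altScan]
    rw [if_neg hkw]
    by_cases hl : acc.length < 2
    · rw [if_pos hl, ih (acc ++ [kw]) hrest (by simp; omega)]
      have h2 : 2 - acc.length = (2 - (acc ++ [kw]).length) + 1 := by simp; omega
      simp [h2, List.take_succ_cons]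
    · have hacc : acc.length = 2 := by omega
      rw [if_neg hl, ih acc hrest hlen]
      simp [hacc]

-- ===== VERDICT (by name: the statement is the Claim_ definition above) =====
theorem make_category_name_spec : Claim_equal_make_category_name := by
  intro ks _
  unfold Spec_make_category_name make_category_name make_category_name_alt
  rcases hscan : altScan ks [] with ⟨fb, singles⟩
  have hfst := altScan_fst ks []
  rw [hscan] at hfst
  rcases hbg : ks.filter (fun kw => PySem.Str.isIn "-" kw) with _ | ⟨b, bs⟩
  · -- no bigram present
    have hnd : ∀ kw ∈ ks, ¬ PySem.Str.isIn "-" kw = true := by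
      intro kw hkw
      exact List.filter_eq_nil_iff.mp hbg kw hkw
    have hfb : fb = none := by rw [hbg] at hfst; exact hfst
    have hsingles : singles = ks.take 2 := by
      have h := altScan_snd ks [] hnd (by simp)
      rw [hscan] at h; simpa using h
    have hsf : ks.filter (fun kw => !PySem.Str.isIn "-" kw) = ks := by
      apply List.filter_eq_self.mpr
      intro kw hkw; simpa using hnd kw hkw
    subst hfb hsingles
    simp only [hsf]
    rcases ks with _ | ⟨k, rest⟩
    · rfl
    · show PySem.Str.join " & " (List.map pyTitle (PySem.List.slice (k :: rest) none (some 2))) = _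
      rw [PySem.List.slice_to _ (by norm_num : (0:Int) ≤ 2)]
      show _ = PySem.Str.join " & " (List.map pyTitle (List.take 2 (k :: rest)))
      rfl
  · -- first bigram is b
    have hfb : fb = some b := by rw [hbg] at hfst; exact hfst
    subst hfb
    rfl
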